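-- pv_equiv track=rewrite | github.com/rusty-sj/Applied-Machine-Learning | K-Nearest Neighbor Classifier/knn.py | form_mappings_from_training
-- ===== SOURCE A (Python) =====
-- def form_mappings_from_training(data_map):
--     mappings = {}
--     for row in data_map:
--         for index, val in enumerate(row):
--             feature = (index, val)  # Feature e.g., (1, 'Self-emp-not-inc')
--             if index not in [0, 7, 9]:  # Parse only categorical fields, skip age, hours-per-week and target
--                 if feature not in mappings:
--                     mappings[feature] = len(mappings)  # (1, 'Self-emp-not-inc'): Serial feature #
--     return mappings
-- ===== SOURCE B (Python) =====
-- def form_mappings_from_training(data_map):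
--     # Pass 1: record the GLOBAL cell position of each kept feature's first occurrence.
--     # Pass 2: sort the features by that first-occurrence position; the rank in the
--     # sorted order is the serial number (ranking positions replaces A's fused
--     # "assign len(mappings) on first sight" numbering).
--     first_pos = {}
--     pos = 0
--     for row in data_map:
--         for index, val in enumerate(row):
--             if index not in (0, 7, 9) and (index, val) not in first_pos:
--                 first_pos[(index, val)] = pos
--             pos += 1
--     ranked = sorted(first_pos.items(), key=lambda kv: kv[1])
--     return {f: rank for rank, (f, _) in enumerate(ranked)}
-- ===== Notes on version B (the rewrite author's own statement) =====
-- stated objective: alternative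
-- what changed: B records the global cell position of each kept feature's first occurrence in one pass and then assigns serial numbers as the rank in a sort by that position, instead of A's fused numbering that assigns len(mappings) at the moment a feature is first seen.
import Mathlib
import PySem

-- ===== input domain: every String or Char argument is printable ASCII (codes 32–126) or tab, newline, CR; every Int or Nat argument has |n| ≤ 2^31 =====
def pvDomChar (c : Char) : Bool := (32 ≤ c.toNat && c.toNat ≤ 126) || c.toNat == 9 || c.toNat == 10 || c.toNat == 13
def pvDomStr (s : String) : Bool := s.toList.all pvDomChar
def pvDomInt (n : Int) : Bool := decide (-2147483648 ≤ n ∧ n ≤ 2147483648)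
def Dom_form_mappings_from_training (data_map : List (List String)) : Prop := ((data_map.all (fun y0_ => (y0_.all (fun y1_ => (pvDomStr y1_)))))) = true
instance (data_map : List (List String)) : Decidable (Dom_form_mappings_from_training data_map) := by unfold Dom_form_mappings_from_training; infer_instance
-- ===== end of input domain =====

-- B records each kept feature's first-occurrence position in one pass and assigns serial
-- numbers by ranking the features sorted by that position, instead of A's fused numbering.

-- ===== PORT A =====
-- the dict update of A's inner loop body (feature = (index, val) is the fold variable)
def fmStepA (m : PySem.Dict (Int × String) Int) (feature : Int × String) :
    PySem.Dict (Int × String) Int :=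
  if ¬ (feature.1 = 0 ∨ feature.1 = 7 ∨ feature.1 = 9) then
    (if ¬ m.contains feature then m.insert feature (m.size : Int) else m)
  else m

def form_mappings_from_training (data_map : List (List String)) : List (Int × String × Int) :=
  ((data_map.foldl (fun m row => (PySem.List.enumerate row).foldl fmStepA m)
      PySem.Dict.empty).items).map (fun q => (q.1.1, q.1.2, q.2))

-- ===== PORT B =====
-- state (first_pos, pos); the update of B's inner loop body
def fmStepB (s : PySem.Dict (Int × String) Int × Int) (cell : Int × String) :
    PySem.Dict (Int × String) Int × Int :=
  (if ¬ (cell.1 = 0 ∨ cell.1 = 7 ∨ cell.1 = 9) ∧ ¬ s.1.contains cell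
     then s.1.insert cell s.2 else s.1,
   s.2 + 1)

def form_mappings_from_training_alt (data_map : List (List String)) : List (Int × String × Int) :=
  let st := data_map.foldl (fun s row => (PySem.List.enumerate row).foldl fmStepB s)
      (PySem.Dict.empty, (0 : Int))
  let ranked := PySem.List.sorted st.1.items (fun kv => kv.2) false
  (PySem.List.enumerate ranked).map (fun q => (q.2.1.1, q.2.1.2, q.1))

-- ===== PRECONDITION & SPEC =====
def Spec_form_mappings_from_training (data_map : List (List String)) (out : List (Int × String × Int)) : Prop := out = form_mappings_from_training_alt data_map
instance (data_map : List (List String)) (out : List (Int × String × Int)) : Decidable (Spec_form_mappings_from_training data_map out) := by unfold Spec_form_mappings_from_training; infer_instance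

-- ===== CLAIM (what is proved, stated in full; the proofs are below) =====
def Claim_equal_form_mappings_from_training : Prop := ∀ (data_map : List (List String)), Dom_form_mappings_from_training data_map → Spec_form_mappings_from_training data_map (form_mappings_from_training data_map)

-- ===== LEMMAS AND PROOFS =====

-- the dict holding the features of u numbered 0,1,2,… in order
def fmNum (u : List (Int × String)) : PySem.Dict (Int × String) Int :=
  PySem.Dict.mk ((PySem.List.enumerate u).map (fun q => (q.2, q.1)))

theorem fmNum_keys (u : List (Int × String)) : (fmNum u).keys = u := by
  simp [fmNum, PySem.Dict.keys, List.map_map, Function.comp_def, PySem.List.map_snd_enumerate]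

theorem fmNum_contains (u : List (Int × String)) (f : Int × String) :
    (fmNum u).contains f = decide (f ∈ u) := by
  by_cases h : f ∈ u
  · simp [h, (PySem.Dict.contains_iff_mem_keys (fmNum u) f).2 (by rw [fmNum_keys]; exact h)]
  · simp only [h, decide_false]
    by_contra hc
    exact h (by
      have := (PySem.Dict.contains_iff_mem_keys (fmNum u) f).1 (by
        cases hb : (fmNum u).contains f with
        | true => rfl
        | false => exact absurd hb hc)
      rwa [fmNum_keys] at this)

theorem fmNum_size (u : List (Int × String)) : (fmNum u).size = u.length := by
  simp [fmNum, PySem.Dict.size, PySem.List.length_enumerate]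

theorem fmNum_snoc (u : List (Int × String)) (f : Int × String) :
    fmNum (u ++ [f]) = PySem.Dict.mk ((fmNum u).items ++ [(f, (u.length : Int))]) := by
  simp [fmNum, PySem.List.enumerate_append, PySem.List.enumerate_cons]

-- main invariant of A's fold: folding the (already filtered) feature list with A's dict step
-- numbers exactly the first occurrences
theorem fm_invariant (fs : List (Int × String)) (u : List (Int × String)) :
    fs.foldl (fun m f => if ¬ m.contains f then m.insert f (m.size : Int) else m) (fmNum u)
      = fmNum (fs.foldl PySem.Set.add u) := by
  induction fs generalizing u with
  | nil => rfl
  | cons f fs ih =>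
    simp only [List.foldl_cons]
    by_cases h : f ∈ u
    · rw [fmNum_contains]
      simp only [h, decide_true, not_true, if_false]
      rw [show PySem.Set.add u f = u by simp [PySem.Set.add, h]]
      exact ih u
    · rw [fmNum_contains]
      simp only [h, decide_false]
      have hnc : (fmNum u).contains f = false := by rw [fmNum_contains]; simp [h]
      have hins : (fmNum u).insert f ((fmNum u).size : Int) = fmNum (u ++ [f]) := by
        apply PySem.Dict.ext
        rw [PySem.Dict.items_insert_of_not_contains (h := hnc), fmNum_snoc, fmNum_size]
      rw [hins, show PySem.Set.add u f = u ++ [f] by simp [PySem.Set.add, h]]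
      exact ih (u ++ [f])

-- invariant of B's fold: items stay strictly increasing in position, all below the counter,
-- and the keys accumulate exactly the kept first occurrences
theorem fmB_invariant (cs : List (Int × String)) (d : PySem.Dict (Int × String) Int) (pos : Int)
    (hpw : d.items.Pairwise (fun a b => a.2 < b.2)) (hlt : ∀ x ∈ d.items, x.2 < pos) :
    (cs.foldl fmStepB (d, pos)).1.items.Pairwise (fun a b => a.2 < b.2) ∧
    (∀ x ∈ (cs.foldl fmStepB (d, pos)).1.items, x.2 < (cs.foldl fmStepB (d, pos)).2) ∧
    (cs.foldl fmStepB (d, pos)).1.keys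
      = (cs.filter (fun p => !(p.1 == 0 || p.1 == 7 || p.1 == 9))).foldl PySem.Set.add d.keys := by
  induction cs generalizing d pos with
  | nil =>
    exact ⟨hpw, hlt, rfl⟩
  | cons c cs ih =>
    simp only [List.foldl_cons]
    by_cases hk : c.1 = 0 ∨ c.1 = 7 ∨ c.1 = 9
    · have hstep : fmStepB (d, pos) c = (d, pos + 1) := by
        unfold fmStepB; simp [hk]
      have hb : (!(c.1 == 0 || c.1 == 7 || c.1 == 9)) = false := by
        rcases hk with h | h | h <;> simp [h]
      have hfc : (c :: cs).filter (fun p => !(p.1 == 0 || p.1 == 7 || p.1 == 9))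
          = cs.filter (fun p => !(p.1 == 0 || p.1 == 7 || p.1 == 9)) := by
        simp [List.filter_cons]; tauto
      rw [hstep, hfc]
      exact ih d (pos + 1) hpw (fun x hx => lt_trans (hlt x hx) (by omega))
    · have hb : (!(c.1 == 0 || c.1 == 7 || c.1 == 9)) = true := by
        rw [not_or, not_or] at hk; simp [hk.1, hk.2.1, hk.2.2]
      by_cases hm : d.contains c
      · have hstep : fmStepB (d, pos) c = (d, pos + 1) := by
          unfold fmStepB; simp [hm]
        have hmem : c ∈ d.keys := (PySem.Dict.contains_iff_mem_keys d c).1 hm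
        have hadd : PySem.Set.add d.keys c = d.keys := by simp [PySem.Set.add, hmem]
        have hfc : (c :: cs).filter (fun p => !(p.1 == 0 || p.1 == 7 || p.1 == 9))
            = c :: cs.filter (fun p => !(p.1 == 0 || p.1 == 7 || p.1 == 9)) := by
          simp [List.filter_cons]; tauto
        rw [hstep, hfc]
        have := ih d (pos + 1) hpw (fun x hx => lt_trans (hlt x hx) (by omega))
        simpa [List.foldl_cons, hadd] using this
      · have hstep : fmStepB (d, pos) c = (d.insert c pos, pos + 1) := by
          unfold fmStepB; simp [hk, hm]
        rw [hstep]
        have hnc : d.contains c = false := by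
          cases h : d.contains c with
          | true => exact absurd h hm
          | false => rfl
        have hitems : (d.insert c pos).items = d.items ++ [(c, pos)] :=
          PySem.Dict.items_insert_of_not_contains d pos hnc
        have hmem : c ∉ d.keys := fun h => hm ((PySem.Dict.contains_iff_mem_keys d c).2 h)
        have hkeys : (d.insert c pos).keys = d.keys ++ [c] := by
          simp [PySem.Dict.keys, hitems]
        have hpw' : (d.insert c pos).items.Pairwise (fun a b => a.2 < b.2) := by
          rw [hitems, List.pairwise_append]
          exact ⟨hpw, List.pairwise_singleton _ _, by
            intro a ha b hb'; simp at hb'; rw [hb']; exact hlt a ha⟩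
        have hlt' : ∀ x ∈ (d.insert c pos).items, x.2 < pos + 1 := by
          intro x hx
          rw [hitems] at hx
          rcases List.mem_append.1 hx with h | h
          · exact lt_trans (hlt x h) (by omega)
          · simp at h; rw [h]; omega
        have hadd : PySem.Set.add d.keys c = d.keys ++ [c] := by simp [PySem.Set.add, hmem]
        have hfc : (c :: cs).filter (fun p => !(p.1 == 0 || p.1 == 7 || p.1 == 9))
            = c :: cs.filter (fun p => !(p.1 == 0 || p.1 == 7 || p.1 == 9)) := by
          simp [List.filter_cons]; tauto
        rw [hfc]
        have := ih (d.insert c pos) (pos + 1) hpw' hlt'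
        simpa [List.foldl_cons, hkeys, hadd] using this

-- reindexing: enumerating a list of pairs and keeping (key, index) equals
-- enumerating its keys
theorem fm_enum_map (l : List ((Int × String) × Int)) (s : Int) :
    (PySem.List.enumerate l s).map (fun q => (q.2.1.1, q.2.1.2, q.1))
      = (PySem.List.enumerate (l.map Prod.fst) s).map (fun q => (q.2.1, q.2.2, q.1)) := by
  induction l generalizing s with
  | nil => rfl
  | cons x xs ih => simp [PySem.List.enumerate_cons, ih]

-- ===== VERDICT (by name: the statement is the Claim_ definition above) =====
theorem form_mappings_from_training_spec : Claim_equal_form_mappings_from_training := by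
  intro data_map _
  unfold Spec_form_mappings_from_training form_mappings_from_training form_mappings_from_training_alt
  -- collapse each nested fold to a fold over the flattened cell list
  have hflatA : ∀ (rows : List (List String)) (m : PySem.Dict (Int × String) Int),
      rows.foldl (fun m row => (PySem.List.enumerate row).foldl fmStepA m) m
        = (rows.flatMap (fun row => PySem.List.enumerate row)).foldl fmStepA m := by
    intro rows
    induction rows with
    | nil => intro m; rfl
    | cons r rs ih => intro m; simp [List.flatMap_cons, List.foldl_append, ih]
  have hflatB : ∀ (rows : List (List String)) (s : PySem.Dict (Int × String) Int × Int),
      rows.foldl (fun s row => (PySem.List.enumerate row).foldl fmStepB s) s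
        = (rows.flatMap (fun row => PySem.List.enumerate row)).foldl fmStepB s := by
    intro rows
    induction rows with
    | nil => intro s; rfl
    | cons r rs ih => intro s; simp [List.flatMap_cons, List.foldl_append, ih]
  rw [hflatA, hflatB]
  set cs := data_map.flatMap (fun row => PySem.List.enumerate row) with hcs
  -- A: push the skip-column test into a filter, then apply the numbering invariant
  have hfilter : ∀ (fs : List (Int × String)) (m : PySem.Dict (Int × String) Int),
      fs.foldl fmStepA m
        = (fs.filter (fun p => !(p.1 == 0 || p.1 == 7 || p.1 == 9))).foldl
            (fun m f => if ¬ m.contains f then m.insert f (m.size : Int) else m) m := by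
    intro fs
    induction fs with
    | nil => intro m; rfl
    | cons f fs ih =>
      intro m
      by_cases h : f.1 = 0 ∨ f.1 = 7 ∨ f.1 = 9
      · have hb : (!(f.1 == 0 || f.1 == 7 || f.1 == 9)) = false := by
          rcases h with h | h | h <;> simp [h]
        have hs : fmStepA m f = m := by
          unfold fmStepA; rw [if_neg (not_not_intro h)]
        rw [List.foldl_cons, hs, ih]
        simp only [List.filter_cons, hb, Bool.false_eq_true, if_false]
      · have hb : (!(f.1 == 0 || f.1 == 7 || f.1 == 9)) = true := by
          rw [not_or, not_or] at h; simp [h.1, h.2.1, h.2.2]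
        have hs : fmStepA m f = if ¬ m.contains f then m.insert f (m.size : Int) else m := by
          unfold fmStepA; rw [if_pos h]
        rw [List.foldl_cons, hs, ih]
        simp only [List.filter_cons, hb, if_true, List.foldl_cons]
  have hempty : (PySem.Dict.empty : PySem.Dict (Int × String) Int) = fmNum [] := rfl
  rw [hfilter]
  conv_lhs => rw [hempty, fm_invariant]
  set K := (cs.filter (fun p => !(p.1 == 0 || p.1 == 7 || p.1 == 9))).foldl PySem.Set.add []
    with hK
  -- B: apply the position invariant, drop the redundant sort, and reindex
  obtain ⟨hpw, hlt, hkeys⟩ := fmB_invariant cs PySem.Dict.empty 0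
    (by simp [PySem.Dict.empty])
    (by intro x hx; simp [PySem.Dict.empty] at hx)
  set st := cs.foldl fmStepB (PySem.Dict.empty, (0 : Int)) with hst
  have hpwle : st.1.items.Pairwise (fun a b => a.2 ≤ b.2) := hpw.imp (fun h => le_of_lt h)
  have hsorted : PySem.List.sorted st.1.items (fun kv => kv.2) false = st.1.items :=
    PySem.List.sorted_eq_self_of_pairwise st.1.items (fun kv => kv.2) hpwle
  simp only [hsorted]
  rw [fm_enum_map]
  have hkeq : st.1.items.map Prod.fst = K := by
    have : st.1.keys = K := by rw [hkeys]; rfl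
    simpa [PySem.Dict.keys] using this
  rw [hkeq]
  simp [fmNum, List.map_map, Function.comp_def]
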